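-- pv_equiv track=rewrite | github.com/Lherrera094/Master_Thesis | Rotational Transform Couplings/iota_Analysis_TK.py | get_families
-- ===== SOURCE A (Python) =====
-- def get_families(coupl,period):
--     n_fam = {}
--     for n in coupl["n"]:
--         key = n%period
--         if key not in n_fam:
--             n_fam[key] = []
--         n_fam[key].append(n)
--
--     return n_fam
-- ===== SOURCE B (Python) =====
-- def get_families(coupl, period):
--     # Alternative decomposition: collect keys first (ordered dedup), then
--     # build each family in one filtering comprehension per key.
--     values = coupl["n"]
--     keys = list(dict.fromkeys(n % period for n in values))
--     return {k: [n for n in values if n % period == k] for k in keys}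
-- ===== Notes on version B (the rewrite author's own statement) =====
-- stated objective: alternative
-- what changed: Replaces the single-pass mutable hash bucketing with a two-phase decomposition: first an ordered dedup of the keys n % period, then one filtering comprehension per key to build each family.
import Mathlib
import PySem

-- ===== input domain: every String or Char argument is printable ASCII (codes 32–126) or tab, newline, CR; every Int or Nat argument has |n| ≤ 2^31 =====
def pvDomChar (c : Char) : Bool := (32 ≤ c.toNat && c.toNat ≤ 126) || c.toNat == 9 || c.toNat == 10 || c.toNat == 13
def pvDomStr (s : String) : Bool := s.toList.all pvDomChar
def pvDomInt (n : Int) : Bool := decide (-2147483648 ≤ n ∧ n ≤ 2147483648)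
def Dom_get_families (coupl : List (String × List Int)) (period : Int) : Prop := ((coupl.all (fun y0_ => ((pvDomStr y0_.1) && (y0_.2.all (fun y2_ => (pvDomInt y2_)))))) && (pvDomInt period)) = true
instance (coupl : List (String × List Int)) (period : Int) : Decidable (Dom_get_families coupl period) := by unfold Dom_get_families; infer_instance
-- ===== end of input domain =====

-- B groups by first collecting the deduplicated keys (n % period) and then building
-- each family with one filter per key, instead of A's single-pass mutable bucketing.


-- ===== PORT A =====
-- n_fam = {}; for n in coupl["n"]: key = n%period; if key not in n_fam: n_fam[key]=[]; n_fam[key].append(n)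
def get_families (coupl : List (String × List Int)) (period : Int) : List (Int × List Int) :=
  let values := (PySem.Dict.mk coupl).getD "n" []   -- KeyError excluded by Pre_
  let n_fam := values.foldl (fun d n =>
      let key := PySem.Int.mod n period             -- ZeroDivisionError excluded by Pre_
      let d := if d.contains key then d else d.insert key []
      d.modify key [] (fun xs => xs ++ [n])) PySem.Dict.empty
  n_fam.items

-- ===== PORT B =====
-- values = coupl["n"]; keys = list(dict.fromkeys(n % period for n in values));
-- return {k: [n for n in values if n % period == k] for k in keys}
def get_families_alt (coupl : List (String × List Int)) (period : Int) : List (Int × List Int) :=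
  let values := (PySem.Dict.mk coupl).getD "n" []
  let keys := PySem.List.dedup (values.map (fun n => PySem.Int.mod n period))
  keys.map (fun k => (k, values.filter (fun n => PySem.Int.mod n period == k)))

-- ===== PRECONDITION & SPEC =====
-- Pre_ excludes exactly where A raises: a missing "n" key (KeyError) and period = 0
-- with a nonempty value list (ZeroDivisionError on the first n % period).
def Pre_get_families (coupl : List (String × List Int)) (period : Int) : Prop :=
  ((PySem.Dict.mk coupl).get? "n").isSome ∧
  (period ≠ 0 ∨ (PySem.Dict.mk coupl).getD "n" [] = [])
instance (coupl : List (String × List Int)) (period : Int) : Decidable (Pre_get_families coupl period) := by unfold Pre_get_families; infer_instance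

def pvWitness_get_families : (List (String × List Int)) × Int := ([("n", [5, -3, 12, 2])], 7)

def Spec_get_families (coupl : List (String × List Int)) (period : Int) (out : List (Int × List Int)) : Prop := out = get_families_alt coupl period
instance (coupl : List (String × List Int)) (period : Int) (out : List (Int × List Int)) : Decidable (Spec_get_families coupl period out) := by unfold Spec_get_families; infer_instance

-- ===== CLAIM (what is proved, stated in full; the proofs are below) =====
def Claim_equal_get_families : Prop := ∀ (coupl : List (String × List Int)) (period : Int), Dom_get_families coupl period → Pre_get_families coupl period → Spec_get_families coupl period (get_families coupl period)

-- ===== LEMMAS AND PROOFS =====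

-- A's loop body ('setdefault-then-append') is exactly Dict.modify with default [].
theorem step_eq_modify (d : PySem.Dict Int (List Int)) (k n : Int) :
    (if d.contains k then d else d.insert k []).modify k [] (fun xs => xs ++ [n])
      = d.modify k [] (fun xs => xs ++ [n]) := by
  by_cases h : d.contains k = true
  · simp [h]
  · simp only [h, Bool.false_eq_true, if_false, PySem.Dict.modify,
      PySem.Dict.getD_insert_self, PySem.Dict.insert_insert_self,
      PySem.Dict.getD_of_not_contains d [] (by simpa using h)]

-- Value of every bucket after the modify-fold: the filtered input, in order.
theorem getD_fold_filter (p : Int) (vs : List Int) (d : PySem.Dict Int (List Int)) (c : Int) :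
    (vs.foldl (fun d n => d.modify (PySem.Int.mod n p) [] (fun xs => xs ++ [n])) d).getD c []
      = d.getD c [] ++ vs.filter (fun n => PySem.Int.mod n p == c) := by
  induction vs generalizing d with
  | nil => simp
  | cons n vs ih =>
      simp only [List.foldl_cons, ih, List.filter_cons, PySem.Dict.getD_modify]
      by_cases h : PySem.Int.mod n p = c
      · simp [h]
      · have : (PySem.Int.mod n p == c) = false := by simpa using h
        simp only [this, Bool.false_eq_true, if_false]
        rw [if_neg (fun hc => h hc.symm)]

-- ===== VERDICT (by name: the statement is the Claim_ definition above) =====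
theorem get_families_spec : Claim_equal_get_families := by
  intro coupl period _ _
  show get_families coupl period = get_families_alt coupl period
  unfold get_families get_families_alt
  set vs := (PySem.Dict.mk coupl).getD "n" [] with hvs
  simp only [step_eq_modify]
  have hkeys :
      (vs.foldl (fun d n => d.modify (PySem.Int.mod n period) [] (fun xs => xs ++ [n]))
        PySem.Dict.empty).keys = PySem.Set.ofList (vs.map (fun n => PySem.Int.mod n period)) := by
    rw [PySem.Dict.keys_foldl_modify_key vs (fun n => PySem.Int.mod n period) []
      (fun _ n xs => xs ++ [n]) PySem.Dict.empty]
    simp [PySem.Dict.keys_empty, PySem.Set.update_nil_left]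
  have hnd :
      (vs.foldl (fun d n => d.modify (PySem.Int.mod n period) [] (fun xs => xs ++ [n]))
        PySem.Dict.empty).keys.Nodup :=
    PySem.Dict.nodup_keys_foldl_modify_key vs (fun n => PySem.Int.mod n period) []
      (fun _ n xs => xs ++ [n]) PySem.Dict.empty (by simp)
  rw [PySem.Dict.items_eq_map_keys _ hnd [], hkeys, PySem.List.dedup_eq_ofList]
  refine List.map_congr_left (fun k _ => ?_)
  rw [getD_fold_filter]
  simp [PySem.Dict.getD_empty]
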